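-- pv_equiv track=rewrite | github.com/lavonnehoang/CirclesCountry | eclipse-workspace/APT4/BagFitter.py | bags
-- ===== SOURCE A (Python) =====
-- def bags(strength, food):
--     bags = []
--     counts = []
--     for item in food:
--         if item not in bags:
--             bags.append(item)
--             counts.append(0)
--         location = bags.index(item)
--         counts[location] += 1
--     s = 0
--     for x in counts:
--         if x % strength == 0:
--             s += x//strength
--         else:
--             s += (x//strength) +1
--     return s
-- ===== SOURCE B (Python) =====
-- def bags(strength, food):
--     # Sort a copy, then one pass over the sorted sequence grouping consecutive
--     # equal items; each run of length (j - i) contributes ceil((j-i)/strength),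
--     # computed as -(-(j - i) // strength).
--     sf = sorted(food)
--     n = len(sf)
--     total = 0
--     i = 0
--     while i < n:
--         j = i + 1
--         while j < n and sf[j] == sf[i]:
--             j += 1
--         total += -(-(j - i) // strength)
--         i = j
--     return total
-- ===== Notes on version B (the rewrite author's own statement) =====
-- stated objective: faster
-- what changed: Replaces A's frequency-table counting (parallel bags/counts lists with a membership test and list.index scan per element, then a summing pass) by sort-then-group: sort a copy of food and make one pass over the sorted sequence, adding ceil(runLength/strength) as -(-(j-i)//strength) whenever a run of consecutive equal items ends.
import Mathlib
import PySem

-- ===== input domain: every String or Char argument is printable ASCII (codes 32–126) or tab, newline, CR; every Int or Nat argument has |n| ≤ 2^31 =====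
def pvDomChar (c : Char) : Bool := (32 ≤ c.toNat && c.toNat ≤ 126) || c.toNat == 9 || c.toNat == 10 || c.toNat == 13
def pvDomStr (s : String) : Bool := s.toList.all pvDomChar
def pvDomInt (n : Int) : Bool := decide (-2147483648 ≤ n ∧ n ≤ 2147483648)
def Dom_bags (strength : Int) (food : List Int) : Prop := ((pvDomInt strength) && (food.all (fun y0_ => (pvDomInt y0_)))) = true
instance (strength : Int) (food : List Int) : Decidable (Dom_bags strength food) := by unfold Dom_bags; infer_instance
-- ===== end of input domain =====

-- B sorts a copy of food and makes one pass grouping consecutive equal items,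
-- adding ceil(runLength/strength) per run; objective: faster (no per-element
-- membership/index scans over the distinct-items list). Return value only; neither
-- version mutates food (B sorts a copy).

-- ===== PORT A =====
-- A's first loop: bags/counts kept as a pair of parallel lists
def bagsStepA (st : List Int × List Int) (item : Int) : List Int × List Int :=
  let st' := if item ∈ st.1 then st else (st.1 ++ [item], st.2 ++ [0])
  match PySem.List.index? st'.1 item with
  | some location =>
      -- counts[location] += 1 ; location is list.index's result, always in range here
      (st'.1, st'.2.set location (st'.2.getD location 0 + 1))
  | none => st'  -- unreachable: item was just ensured to be in bags

def bags (strength : Int) (food : List Int) : Int :=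
  let st := food.foldl bagsStepA ([], [])
  st.2.foldl (fun s x =>
    if PySem.Int.mod x strength = 0 then s + PySem.Int.floordiv x strength
    else s + (PySem.Int.floordiv x strength + 1)) 0

-- ===== PORT B =====
-- outer while loop of Source B: each step consumes one run of equal items from the
-- remaining (sorted) suffix; the inner while (j advancing over equal items) is the
-- takeWhile/dropWhile split of that suffix
def bagsGo (strength : Int) : List Int → Int
  | [] => 0
  | x :: t =>
      let run : Int := 1 + ((t.takeWhile (fun y => y == x)).length : Int)
      (-(PySem.Int.floordiv (-run) strength)) + bagsGo strength (t.dropWhile (fun y => y == x))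
termination_by l => l.length
decreasing_by
  exact Nat.lt_succ_of_le (List.length_dropWhile_le _ _)

def bags_alt (strength : Int) (food : List Int) : Int :=
  bagsGo strength (PySem.List.sorted food (fun x => x) false)

-- ===== PRECONDITION & SPEC =====
-- Pre_ excludes exactly the inputs where Python A raises ZeroDivisionError:
-- strength = 0 with nonempty food (B divides by strength there as well).
def Pre_bags (strength : Int) (food : List Int) : Prop := strength ≠ 0 ∨ food = []
instance (strength : Int) (food : List Int) : Decidable (Pre_bags strength food) := by unfold Pre_bags; infer_instance
def pvWitness_bags : Int × List Int := (3, [1, 2, 1, 1, 2, 5])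
def Spec_bags (strength : Int) (food : List Int) (out : Int) : Prop := out = bags_alt strength food
instance (strength : Int) (food : List Int) (out : Int) : Decidable (Spec_bags strength food out) := by unfold Spec_bags; infer_instance

-- ===== CLAIM (what is proved, stated in full; the proofs are below) =====
def Claim_equal_bags : Prop := ∀ (strength : Int) (food : List Int), Dom_bags strength food → Pre_bags strength food → Spec_bags strength food (bags strength food)

-- ===== LEMMAS AND PROOFS =====

-- ceiling division with a POSITIVE divisor, remainder nonzero
theorem ceil_pos (b a : Int) (hb : 0 < b) (hm : PySem.Int.mod a b ≠ 0) :
    PySem.Int.floordiv a b + 1 = -(PySem.Int.floordiv (-a) b) := by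
  have h := PySem.Int.floordiv_mul_add_mod a b
  have h1 : 0 < PySem.Int.mod a b :=
    lt_of_le_of_ne (PySem.Int.mod_nonneg a hb) (Ne.symm hm)
  have h2 := PySem.Int.mod_lt a hb
  symm
  rw [PySem.Int.neg_floordiv_neg_eq_iff_of_pos hb]
  refine ⟨?_, ?_⟩ <;> nlinarith

-- Python's ceiling division -(-x // s) equals A's floor-plus-remainder-test form
theorem ceil_form (s x : Int) (hs : s ≠ 0) :
    (if PySem.Int.mod x s = 0 then PySem.Int.floordiv x s
     else PySem.Int.floordiv x s + 1) = -(PySem.Int.floordiv (-x) s) := by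
  split_ifs with h
  · obtain ⟨k, rfl⟩ := (PySem.Int.mod_eq_zero_iff_dvd x s).mp h
    show Int.fdiv _ _ = -(Int.fdiv _ _)
    have e : -(s * k) = s * (-k) := by ring
    rw [e, Int.mul_fdiv_cancel_left _ hs, Int.mul_fdiv_cancel_left _ hs, neg_neg]
  · rcases lt_or_gt_of_ne hs with hneg | hpos
    · have e1 := PySem.Int.floordiv_neg_neg (-x) (-s)
      have e2 := PySem.Int.floordiv_neg_neg x (-s)
      have e3 := PySem.Int.mod_neg_neg (-x) (-s)
      simp only [neg_neg] at e1 e2 e3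
      have hc := ceil_pos (-s) (-x) (by omega) (by rw [e3] at h; omega)
      simp only [neg_neg] at hc
      rw [e1, e2]; exact hc
    · exact ceil_pos s x hpos h

-- the canonical value both programs compute: for a chosen enumeration D of the
-- distinct items, the sum of ceil(count/strength)
def ceilCount (s : Int) (l : List Int) (k : Int) : Int :=
  -(PySem.Int.floordiv (-(l.count k : Int)) s)

-- one step of A's counting loop corresponds to one dict insert:
-- the dict's item list IS bags.zip counts throughout
theorem step_inv (bags counts : List Int) (item : Int)
    (hn : bags.Nodup) (hl : counts.length = bags.length) :
    (bagsStepA (bags, counts) item).1.Nodup ∧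
    (bagsStepA (bags, counts) item).2.length = (bagsStepA (bags, counts) item).1.length ∧
    (PySem.Dict.mk (bags.zip counts)).insert item
        ((PySem.Dict.mk (bags.zip counts)).getD item 0 + 1)
      = PySem.Dict.mk ((bagsStepA (bags, counts) item).1.zip (bagsStepA (bags, counts) item).2) := by
  have hfst : (bags.zip counts).map Prod.fst = bags := List.map_fst_zip (le_of_eq hl.symm)
  by_cases hmem : item ∈ bags
  · -- existing key
    obtain ⟨i, hi⟩ := Option.isSome_iff_exists.mp ((PySem.List.index?_isSome_iff bags item).mpr hmem)
    obtain ⟨pre, suf, hsplit, hlen, hpre⟩ := (PySem.List.index?_eq_some_iff bags item i).mp hi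
    have hilt : i < bags.length := by rw [hsplit, ← hlen]; simp
    have hbi : bags[i]'hilt = item := by
      subst hsplit; subst hlen; simp
    have hic : i < counts.length := hl ▸ hilt
    simp only [bagsStepA, if_pos hmem, hi]
    have hgetD : counts.getD i 0 = counts[i]'hic := List.getD_eq_getElem counts 0 hic
    have hcont : (PySem.Dict.mk (bags.zip counts)).contains item = true := by
      rw [PySem.Dict.contains_mk]
      refine List.any_eq_true.mpr ⟨(item, counts[i]'hic), ?_, by simp⟩
      have : (bags.zip counts)[i]'(by simp [List.length_zip]; omega) = (item, counts[i]'hic) := by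
        simp [List.getElem_zip, hbi]
      exact this ▸ List.getElem_mem _
    have hmemit : (item, counts[i]'hic) ∈ (bags.zip counts) := by
      have : (bags.zip counts)[i]'(by simp [List.length_zip]; omega) = (item, counts[i]'hic) := by
        simp [List.getElem_zip, hbi]
      exact this ▸ List.getElem_mem _
    have hknd : (List.map Prod.fst (bags.zip counts)).Nodup := by rw [hfst]; exact hn
    have hgd : (PySem.Dict.mk (bags.zip counts)).getD item 0 = counts[i]'hic :=
      PySem.Dict.getD_of_mem_items _ hmemit (by simpa [PySem.Dict.keys, List.zip] using hknd) 0
    refine ⟨hn, by simp [hl], ?_⟩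
    apply PySem.Dict.ext
    rw [PySem.Dict.items_insert]
    simp only [hcont, if_pos]
    show (bags.zip counts).map _ = (bags.zip (counts.set i _))
    rw [hgd, hgetD]
    apply List.ext_getElem
    · simp [List.length_zip, hl]
    · intro j hj1 hj2
      have hjb : j < bags.length := by simp [List.length_zip, hl] at hj1; omega
      have hjc : j < counts.length := hl ▸ hjb
      simp only [List.getElem_map, List.getElem_zip, List.getElem_set]
      by_cases hji : bags[j]'hjb = item
      · have hje : j = i := (List.Nodup.getElem_inj_iff hn).mp (by rw [hji, hbi])
        subst hje
        simp [hji]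
      · have hne : ¬ j = i := fun e => hji (by subst e; exact hbi ▸ rfl)
        have hne' : ¬ i = j := fun e => hne e.symm
        simp [hji, hne']
  · -- new key
    have hidx : PySem.List.index? (bags ++ [item]) item = some bags.length :=
      PySem.List.index?_append_singleton_self bags item hmem
    simp only [bagsStepA, if_neg hmem, hidx]
    have hcont : (PySem.Dict.mk (bags.zip counts)).contains item = false := by
      rw [PySem.Dict.contains_mk]
      simp only [List.any_eq_false]
      intro p hp
      have : p.1 ∈ bags := hfst ▸ List.mem_map_of_mem hp
      simp only [beq_iff_eq]
      exact fun e => hmem (e ▸ this)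
    have hgd : (PySem.Dict.mk (bags.zip counts)).getD item 0 = 0 :=
      PySem.Dict.getD_of_not_contains _ 0 hcont
    have hset : (counts ++ [0]).set bags.length (((counts ++ [0]).getD bags.length 0) + 1)
        = counts ++ [1] := by
      have : (counts ++ [0]).getD bags.length 0 = 0 := by
        rw [← hl]
        rw [List.getD_eq_getElem (hn := by simp)]
        simp
      rw [this, ← hl, List.set_append_right _ _ (le_refl _)]
      simp
    refine ⟨?_, by simp [hl], ?_⟩
    · simp [List.nodup_append, hn]
      exact fun a ha e => hmem (e ▸ ha)
    · apply PySem.Dict.ext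
      rw [PySem.Dict.items_insert]
      simp only [hcont, Bool.false_eq_true, hgd]
      show (bags.zip counts) ++ [(item, 0 + 1)] = ((bags ++ [item]).zip _)
      rw [hset, List.zip_append hl.symm]
      norm_num

-- A's counting loop equals the dict-counter fold over the whole list
theorem count_loop_inv (l : List Int) : ∀ (bags counts : List Int), bags.Nodup → counts.length = bags.length →
    (l.foldl bagsStepA (bags, counts)).1.Nodup ∧
    (l.foldl bagsStepA (bags, counts)).2.length = (l.foldl bagsStepA (bags, counts)).1.length ∧
    l.foldl (fun d item => d.insert item (d.getD item 0 + 1)) (PySem.Dict.mk (bags.zip counts))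
      = PySem.Dict.mk ((l.foldl bagsStepA (bags, counts)).1.zip (l.foldl bagsStepA (bags, counts)).2) := by
  induction l with
  | nil => intro bags counts hn hl; exact ⟨hn, hl, rfl⟩
  | cons x t ih =>
    intro bags counts hn hl
    obtain ⟨h1, h2, h3⟩ := step_inv bags counts x hn hl
    rcases hst : bagsStepA (bags, counts) x with ⟨b', c'⟩
    rw [hst] at h1 h2 h3
    simp only [List.foldl_cons, hst, h3]
    exact ih b' c' h1 h2

-- A's value is the canonical sum over the first-occurrence enumeration of food
theorem bags_eq_sum (s : Int) (food : List Int) (hs : s ≠ 0) :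
    bags s food = ((PySem.Set.ofList food).map (ceilCount s food)).sum := by
  unfold bags
  obtain ⟨hn, hl, hd⟩ := count_loop_inv food [] [] (by simp) rfl
  rcases hst : food.foldl bagsStepA ([], []) with ⟨b', c'⟩
  rw [hst] at hl hd
  have hemp : (PySem.Dict.empty : PySem.Dict Int Int)
      = PySem.Dict.mk (List.zip ([] : List Int) ([] : List Int)) := rfl
  have hcnt : PySem.Dict.mk (b'.zip c') = PySem.Dict.counter food := by
    rw [← hd, ← hemp, PySem.Dict.foldl_insert_getD_add_one_eq_counter]
  have hvals : c' = (PySem.Dict.counter food).values := by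
    have h1 : (PySem.Dict.mk (b'.zip c')).values = c' := by
      simpa [PySem.Dict.values, List.zip] using List.map_snd_zip (le_of_eq hl)
    rw [← h1, hcnt]
  have hvals2 : (PySem.Dict.counter food).values
      = (PySem.Set.ofList food).map (fun k => ((food.count k : Nat) : Int)) := by
    show (PySem.Dict.counter food).items.map Prod.snd = _
    rw [PySem.Dict.items_counter, List.map_map]
    rfl
  rw [show c' = (PySem.Set.ofList food).map (fun k => ((food.count k : Nat) : Int)) from
        hvals.trans hvals2]
  rw [PySem.List.foldl_congr_mem _ _ (fun acc x => acc + (-(PySem.Int.floordiv (-x) s))) _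
        (fun acc x _ => by
          have hcf := ceil_form s x hs
          split_ifs at hcf ⊢ with h <;> linarith)]
  rw [PySem.List.foldl_add, List.map_map, zero_add]
  rfl

-- B's run-grouping pass over a ≤-sorted list computes the canonical sum for any
-- duplicate-free enumeration D of its distinct items
theorem go_eq_sum (s : Int) : ∀ (n : Nat) (l : List Int), l.length ≤ n →
    l.Pairwise (· ≤ ·) → ∀ (D : List Int), D.Nodup → (∀ a, a ∈ D ↔ a ∈ l) →
    bagsGo s l = (D.map (ceilCount s l)).sum := by
  intro n
  induction n with
  | zero =>
    intro l hlen _ D _ hmem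
    have hl : l = [] := List.eq_nil_of_length_eq_zero (Nat.le_zero.mp hlen)
    subst hl
    have hD : D = [] := List.eq_nil_iff_forall_not_mem.mpr (fun a ha => by
      simpa using (hmem a).mp ha)
    subst hD
    simp [bagsGo]
  | succ m ih =>
    intro l hlen hpw D hnd hmem
    match l with
    | [] =>
      have hD : D = [] := List.eq_nil_iff_forall_not_mem.mpr (fun a ha => by
        simpa using (hmem a).mp ha)
      subst hD
      simp [bagsGo]
    | x :: t =>
      have hxle : ∀ y ∈ t, x ≤ y := (List.pairwise_cons.mp hpw).1
      have hpwt : t.Pairwise (· ≤ ·) := (List.pairwise_cons.mp hpw).2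
      have hsplit : t.takeWhile (fun y => y == x) ++ t.dropWhile (fun y => y == x) = t :=
        List.takeWhile_append_dropWhile
      have htwx : ∀ y ∈ t.takeWhile (fun y => y == x), y = x := fun y hy => by
        have := List.mem_takeWhile_imp hy
        simpa using this
      have hdwsub : (t.dropWhile (fun y => y == x)).Sublist t :=
        List.dropWhile_sublist (fun y => y == x)
      have hxdw : x ∉ t.dropWhile (fun y => y == x) := by
        intro hx
        have hne : t.dropWhile (fun y => y == x) ≠ [] := by
          intro he; rw [he] at hx; simp at hx
        have hhd := List.head_dropWhile_not (fun y => y == x) (l := t) hne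
        have hhne : (t.dropWhile (fun y => y == x)).head hne ≠ x := by
          simpa using hhd
        have hhmem : (t.dropWhile (fun y => y == x)).head hne ∈ t :=
          hdwsub.subset (List.head_mem hne)
        have hxlt : x < (t.dropWhile (fun y => y == x)).head hne :=
          lt_of_le_of_ne (hxle _ hhmem) (Ne.symm hhne)
        have hpwdw : (t.dropWhile (fun y => y == x)).Pairwise (· ≤ ·) := hpwt.sublist hdwsub
        rcases hcons : t.dropWhile (fun y => y == x) with _ | ⟨h, r⟩
        · rw [hcons] at hx; simp at hx
        · rw [hcons] at hx hpwdw
          have hhead : (t.dropWhile (fun y => y == x)).head hne = h := by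
            rw [List.head_eq_iff_head?_eq_some]; rw [hcons]; rfl
          rw [hhead] at hhne hxlt
          rcases List.mem_cons.mp hx with rfl | hx2
          · exact hhne rfl
          · have : h ≤ x := (List.pairwise_cons.mp hpwdw).1 x hx2
            omega
      have hcountx : (x :: t).count x = 1 + (t.takeWhile (fun y => y == x)).length := by
        rw [List.count_cons_self]
        conv_lhs => rw [← hsplit]
        rw [List.count_append]
        have h1 : (t.takeWhile (fun y => y == x)).count x
            = (t.takeWhile (fun y => y == x)).length :=
          List.count_eq_length.mpr (fun b hb => (htwx b hb).symm)
        have h2 : (t.dropWhile (fun y => y == x)).count x = 0 := List.count_eq_zero.mpr hxdw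
        omega
      have hcounty : ∀ k, k ≠ x → (x :: t).count k = (t.dropWhile (fun y => y == x)).count k := by
        intro k hk
        have h0 : (x :: t).count k = t.count k := by simp [Ne.symm hk]
        conv_lhs => rw [h0, ← hsplit]
        rw [List.count_append]
        have : (t.takeWhile (fun y => y == x)).count k = 0 :=
          List.count_eq_zero.mpr (fun hm => hk (htwx k hm))
        omega
      have hxD : x ∈ D := (hmem x).mpr (by simp)
      have hperm : D.Perm (x :: D.erase x) := List.perm_cons_erase hxD
      have hmem' : ∀ a, a ∈ D.erase x ↔ a ∈ t.dropWhile (fun y => y == x) := by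
        intro a
        rw [hnd.mem_erase_iff, hmem]
        constructor
        · rintro ⟨hane, ha⟩
          rcases List.mem_cons.mp ha with rfl | hat
          · exact absurd rfl hane
          · rw [← hsplit] at hat
            rcases List.mem_append.mp hat with h1 | h2
            · exact absurd (htwx a h1) hane
            · exact h2
        · intro ha
          exact ⟨fun he => hxdw (he ▸ ha), List.mem_cons_of_mem _ (hdwsub.subset ha)⟩
      have hdwlen : (t.dropWhile (fun y => y == x)).length ≤ m := by
        have := List.length_dropWhile_le (fun y => y == x) t
        simp only [List.length_cons] at hlen
        omega
      have hih := ih (t.dropWhile (fun y => y == x)) hdwlen (hpwt.sublist hdwsub)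
        (D.erase x) (hnd.erase x) hmem'
      have hunf : bagsGo s (x :: t)
          = (-(PySem.Int.floordiv (-(1 + (((t.takeWhile (fun y => y == x)).length : Nat) : Int))) s))
            + bagsGo s (t.dropWhile (fun y => y == x)) := by
        simp [bagsGo]
      rw [hunf, (hperm.map (ceilCount s (x :: t))).sum_eq, List.map_cons, List.sum_cons]
      congr 1
      · unfold ceilCount
        rw [hcountx]
        push_cast
        ring_nf
      · rw [hih]
        congr 1
        apply List.map_congr_left
        intro a ha
        have hane : a ≠ x := (hnd.mem_erase_iff.mp ha).1
        unfold ceilCount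
        rw [hcounty a hane]

-- ===== VERDICT (by name: the statement is the Claim_ definition above) =====
theorem bags_spec : Claim_equal_bags := by
  intro strength food _ hpre
  unfold Spec_bags
  rcases hpre with hs | rfl
  · have hB : bags_alt strength food
        = ((PySem.Set.ofList food).map (ceilCount strength food)).sum := by
      unfold bags_alt
      set sf := PySem.List.sorted food (fun x => x) false with hsf
      have hperm : sf.Perm food := PySem.List.sorted_perm food (fun x => x) false
      have hcount : ∀ k, sf.count k = food.count k := fun k => hperm.count_eq k
      have := go_eq_sum strength sf.length sf (le_refl _)
        (PySem.List.sorted_pairwise food (fun x => x)) (PySem.Set.ofList food)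
        (PySem.Set.nodup_ofList food)
        (fun a => by rw [PySem.Set.mem_ofList, hsf, PySem.List.mem_sorted])
      rw [this]
      congr 1
      apply List.map_congr_left
      intro a _
      unfold ceilCount
      rw [hcount a]
    rw [hB, bags_eq_sum strength food hs]
  · have hnil : PySem.List.sorted ([] : List Int) (fun x => x) false = [] :=
      (PySem.List.sorted_eq_nil_iff _ _ _).mpr rfl
    show bags strength [] = bagsGo strength (PySem.List.sorted ([] : List Int) (fun x => x) false)
    rw [hnil]
    simp [bags, bagsGo]
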